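-- pv_equiv track=rewrite | github.com/xiajingkang17/mvp | components/base.py | _pick_font
-- ===== SOURCE A (Python) =====
-- def _pick_font(candidates: list[str], available_fonts: list[str]) -> str | None:
--     if not available_fonts:
--         return None
--
--     exact = {f.lower(): f for f in available_fonts}
--     for candidate in candidates:
--         if not candidate:
--             continue
--         hit = exact.get(candidate.lower())
--         if hit:
--             return hit
--
--     lowered = [(f.lower(), f) for f in available_fonts]
--     for candidate in candidates:
--         if not candidate:
--             continue
--         needle = candidate.lower()
--         for lower_name, original_name in lowered:
--             if needle in lower_name:
--                 return original_name
--     return None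
-- ===== SOURCE B (Python) =====
-- def _first_substring(needle, lowered):
--     for lower_name, original_name in lowered:
--         if needle in lower_name:
--             return original_name
--     return None
--
--
-- def _pick_font(candidates: list[str], available_fonts: list[str]) -> str | None:
--     if not available_fonts:
--         return None
--     exact = {f.lower(): f for f in available_fonts}
--     lowered = [(f.lower(), f) for f in available_fonts]
--     fallback = None
--     for candidate in candidates:
--         if not candidate:
--             continue
--         needle = candidate.lower()
--         hit = exact.get(needle)
--         if hit:
--             return hit
--         if fallback is None:
--             fallback = _first_substring(needle, lowered)
--     return fallback
-- ===== Notes on version B (the rewrite author's own statement) =====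
-- stated objective: alternative
-- what changed: Replaces A's two separate passes over the candidates (exact pass, then substring pass) with a single pass that checks exact matches first and records the first substring match in an accumulator, returned only if no candidate ever matches exactly.
import Mathlib
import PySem

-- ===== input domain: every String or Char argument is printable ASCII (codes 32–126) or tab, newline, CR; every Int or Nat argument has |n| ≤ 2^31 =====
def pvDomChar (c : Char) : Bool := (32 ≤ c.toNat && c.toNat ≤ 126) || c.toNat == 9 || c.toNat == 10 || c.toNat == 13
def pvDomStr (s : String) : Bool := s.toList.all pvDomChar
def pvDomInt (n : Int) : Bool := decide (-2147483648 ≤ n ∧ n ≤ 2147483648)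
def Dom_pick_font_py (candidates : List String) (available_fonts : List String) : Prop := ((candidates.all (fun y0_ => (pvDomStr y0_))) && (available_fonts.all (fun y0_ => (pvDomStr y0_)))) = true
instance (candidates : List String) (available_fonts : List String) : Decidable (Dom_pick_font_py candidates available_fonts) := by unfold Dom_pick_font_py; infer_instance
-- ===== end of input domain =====

-- B merges A's two candidate passes into one pass with a first-substring-match accumulator (alternative decomposition, same cost).

-- ===== PORT A =====
-- first for-loop of A: exact-match pass over candidates
def pvExactPassA (exact : PySem.Dict String String) : List String → Option String
  | [] => none
  | c :: rest =>
    if c = "" then pvExactPassA exact rest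
    else
      match exact.get? (PySem.Str.lower c) with
      | some h => if h ≠ "" then some h else pvExactPassA exact rest  -- 'if hit:' truthiness
      | none => pvExactPassA exact rest

-- inner for-loop of A's second pass: first font whose lowered name contains needle
def pvInnerScanA (needle : String) : List (String × String) → Option String
  | [] => none
  | (lower_name, original_name) :: rest =>
    if PySem.Str.isIn needle lower_name then some original_name else pvInnerScanA needle rest

-- second for-loop of A: substring pass over candidates
def pvSubPassA (lowered : List (String × String)) : List String → Option String
  | [] => none
  | c :: rest =>
    if c = "" then pvSubPassA lowered rest
    else
      match pvInnerScanA (PySem.Str.lower c) lowered with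
      | some o => some o
      | none => pvSubPassA lowered rest

def pick_font_py (candidates : List String) (available_fonts : List String) : Option String :=
  if available_fonts = [] then none
  else
    let exact := available_fonts.foldl (fun d f => d.insert (PySem.Str.lower f) f) PySem.Dict.empty
    match pvExactPassA exact candidates with
    | some h => some h
    | none =>
      let lowered := available_fonts.map (fun f => (PySem.Str.lower f, f))
      pvSubPassA lowered candidates

-- ===== PORT B =====
-- helper _first_substring of B
def pvFirstSubB (needle : String) : List (String × String) → Option String
  | [] => none
  | (lower_name, original_name) :: rest =>
    if PySem.Str.isIn needle lower_name then some original_name else pvFirstSubB needle rest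

-- B's single loop over candidates, carrying the fallback accumulator
def pvGoB (exact : PySem.Dict String String) (lowered : List (String × String)) :
    List String → Option String → Option String
  | [], fb => fb
  | c :: rest, fb =>
    if c = "" then pvGoB exact lowered rest fb
    else
      let needle := PySem.Str.lower c
      match exact.get? needle with
      | some h =>
        if h ≠ "" then some h
        else pvGoB exact lowered rest (match fb with | some _ => fb | none => pvFirstSubB needle lowered)
      | none => pvGoB exact lowered rest (match fb with | some _ => fb | none => pvFirstSubB needle lowered)

def pick_font_py_alt (candidates : List String) (available_fonts : List String) : Option String :=
  if available_fonts = [] then none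
  else
    let exact := available_fonts.foldl (fun d f => d.insert (PySem.Str.lower f) f) PySem.Dict.empty
    let lowered := available_fonts.map (fun f => (PySem.Str.lower f, f))
    pvGoB exact lowered candidates none

-- ===== PRECONDITION & SPEC =====
def Spec_pick_font_py (candidates : List String) (available_fonts : List String) (out : Option String) : Prop := out = pick_font_py_alt candidates available_fonts
instance (candidates : List String) (available_fonts : List String) (out : Option String) : Decidable (Spec_pick_font_py candidates available_fonts out) := by unfold Spec_pick_font_py; infer_instance

-- ===== CLAIM (what is proved, stated in full; the proofs are below) =====
def Claim_equal_pick_font_py : Prop := ∀ (candidates : List String) (available_fonts : List String), Dom_pick_font_py candidates available_fonts → Spec_pick_font_py candidates available_fonts (pick_font_py candidates available_fonts)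

-- ===== LEMMAS AND PROOFS =====

lemma innerScan_eq_firstSub (needle : String) (l : List (String × String)) :
    pvInnerScanA needle l = pvFirstSubB needle l := by
  induction l with
  | nil => rfl
  | cons p rest ih =>
    obtain ⟨a, b⟩ := p
    simp [pvInnerScanA, pvFirstSubB, ih]

lemma goB_eq (exact : PySem.Dict String String) (lowered : List (String × String)) :
    ∀ (cands : List String) (fb : Option String),
      pvGoB exact lowered cands fb =
      match pvExactPassA exact cands with
      | some h => some h
      | none =>
        match fb with
        | some x => some x
        | none => pvSubPassA lowered cands := by
  intro cands
  induction cands with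
  | nil =>
    intro fb
    cases fb <;> rfl
  | cons c rest ih =>
    intro fb
    by_cases hc : c = ""
    · simp only [pvGoB, pvExactPassA, pvSubPassA, hc, if_true, ih]
    · simp only [pvGoB, pvExactPassA, pvSubPassA, if_neg hc]
      cases hget : exact.get? (PySem.Str.lower c) with
      | some h =>
        by_cases hh : h = ""
        · simp only [hh, ne_eq, not_true_eq_false, if_false, ih, innerScan_eq_firstSub]
          cases fb with
          | some x => rfl
          | none =>
            cases pvFirstSubB (PySem.Str.lower c) lowered <;>
              cases pvExactPassA exact rest <;> rfl
        · simp [hh]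
      | none =>
        simp only [ih, innerScan_eq_firstSub]
        cases fb with
        | some x => rfl
        | none =>
          cases pvFirstSubB (PySem.Str.lower c) lowered <;>
            cases pvExactPassA exact rest <;> rfl

-- ===== VERDICT (by name: the statement is the Claim_ definition above) =====
theorem pick_font_py_spec : Claim_equal_pick_font_py := by
  intro candidates available_fonts _
  unfold Spec_pick_font_py pick_font_py pick_font_py_alt
  by_cases hav : available_fonts = []
  · simp [hav]
  · simp only [if_neg hav, goB_eq]
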